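-- pv_equiv track=rewrite | github.com/YUJIE47/Data-Compression | Task2_JPEG-like Compression/main.py | Category
-- ===== SOURCE A (Python) =====
-- def Category(num):
--     if num == 0:
--         return 0
--
--     abs_num = abs(num)
--     exponent = 0
--
--     while abs_num > 1:
--         abs_num >>= 1  # 右移 除2
--         exponent += 1
--
--     return exponent + 1
-- ===== SOURCE B (Python) =====
-- def Category(num):
--     return abs(num).bit_length()
-- ===== Notes on version B (the rewrite author's own statement) =====
-- stated objective: idiomatic
-- what changed: Replaced the manual shift-and-count loop with the built-in int.bit_length() on the absolute value, a closed-form computation with no loop (bit_length of 0 is 0, matching A's zero case).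
import Mathlib
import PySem

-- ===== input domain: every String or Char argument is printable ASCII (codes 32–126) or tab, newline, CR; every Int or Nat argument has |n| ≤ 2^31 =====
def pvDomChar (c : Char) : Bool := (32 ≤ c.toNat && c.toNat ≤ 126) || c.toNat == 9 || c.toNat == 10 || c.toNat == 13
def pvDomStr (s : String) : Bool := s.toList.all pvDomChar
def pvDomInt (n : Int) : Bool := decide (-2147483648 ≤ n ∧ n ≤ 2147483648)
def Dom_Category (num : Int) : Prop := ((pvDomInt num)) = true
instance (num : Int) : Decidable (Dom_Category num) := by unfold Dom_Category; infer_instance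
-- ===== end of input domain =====

-- B replaces A's shift-and-count loop with the built-in bit-length of |num| (idiomatic, no loop).

-- ===== PORT A =====
-- the `while abs_num > 1` loop: state (abs_num, exponent)
def categoryLoop (a e : Nat) : Nat :=
  if a > 1 then categoryLoop (a >>> 1) (e + 1) else e
decreasing_by simp [Nat.shiftRight_succ]; omega

def Category (num : Int) : Int :=
  if num = 0 then 0
  else (categoryLoop num.natAbs 0 : Int) + 1

-- ===== PORT B =====
-- port of Python's int.bit_length(): 0 for 0, else floor(log2 n) + 1
def pyBitLength (n : Nat) : Nat := if n = 0 then 0 else n.log2 + 1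

def Category_alt (num : Int) : Int := (pyBitLength num.natAbs : Int)

-- ===== PRECONDITION & SPEC =====
def Spec_Category (num : Int) (out : Int) : Prop := out = Category_alt num
instance (num : Int) (out : Int) : Decidable (Spec_Category num out) := by unfold Spec_Category; infer_instance

-- ===== CLAIM (what is proved, stated in full; the proofs are below) =====
def Claim_equal_Category : Prop := ∀ (num : Int), Dom_Category num → Spec_Category num (Category num)

-- ===== LEMMAS AND PROOFS =====
theorem categoryLoop_eq_log2 (a e : Nat) : categoryLoop a e = a.log2 + e := by
  induction a using Nat.strong_induction_on generalizing e with
  | _ a ih =>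
    rw [categoryLoop, Nat.log2_def]
    by_cases h : a > 1
    · rw [if_pos h, if_pos (by omega), ih (a >>> 1) (by simp [Nat.shiftRight_succ]; omega)]
      simp [Nat.shiftRight_succ, Nat.shiftRight_zero]
      omega
    · rw [if_neg h, if_neg (by omega)]
      omega

-- ===== VERDICT (by name: the statement is the Claim_ definition above) =====
theorem Category_spec : Claim_equal_Category := by
  intro num _
  unfold Spec_Category Category Category_alt pyBitLength
  by_cases h : num = 0
  · simp [h]
  · rw [if_neg h, if_neg (by simpa using h), categoryLoop_eq_log2]
    push_cast
    ring
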